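-- pv_equiv track=rewrite | github.com/gorgeborger-rgb/my-website | scripts/fetch_status.py | overall_status
-- ===== SOURCE A (Python) =====
-- def overall_status(products):
--     if not products:
--         return "Unknown"
--     states = [p["status"].lower() for p in products]
--     if any("updat" in s for s in states):
--         return "Updating"
--     if any("test" in s for s in states):
--         return "Testing"
--     if any("maintenance" in s for s in states):
--         return "Maintenance"
--     if any("offline" in s or "down" in s for s in states):
--         return "Offline"
--     if all("online" in s or "operational" in s for s in states):
--         return "Online"
--     return products[0]["status"]
-- ===== SOURCE B (Python) =====
-- def overall_status(products):
--     if not products: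
--         return "Unknown"
--     has_updating = has_testing = has_maintenance = has_offline = False
--     all_online = True
--     for p in products:
--         s = p["status"].lower()
--         has_updating = has_updating or "updat" in s
--         has_testing = has_testing or "test" in s
--         has_maintenance = has_maintenance or "maintenance" in s
--         has_offline = has_offline or "offline" in s or "down" in s
--         all_online = all_online and ("online" in s or "operational" in s)
--     if has_updating:
--         return "Updating"
--     if has_testing:
--         return "Testing"
--     if has_maintenance:
--         return "Maintenance"
--     if has_offline:
--         return "Offline"
--     if all_online:
--         return "Online"
--     return products[0]["status"]
-- ===== Notes on version B (the rewrite author's own statement) =====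
-- stated objective: alternative
-- what changed: Replaces the intermediate states list and five separate any/all scans over it with a single accumulator loop over products that maintains four category flags and an all_online flag, then applies the priority ladder to the flags.
import Mathlib
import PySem

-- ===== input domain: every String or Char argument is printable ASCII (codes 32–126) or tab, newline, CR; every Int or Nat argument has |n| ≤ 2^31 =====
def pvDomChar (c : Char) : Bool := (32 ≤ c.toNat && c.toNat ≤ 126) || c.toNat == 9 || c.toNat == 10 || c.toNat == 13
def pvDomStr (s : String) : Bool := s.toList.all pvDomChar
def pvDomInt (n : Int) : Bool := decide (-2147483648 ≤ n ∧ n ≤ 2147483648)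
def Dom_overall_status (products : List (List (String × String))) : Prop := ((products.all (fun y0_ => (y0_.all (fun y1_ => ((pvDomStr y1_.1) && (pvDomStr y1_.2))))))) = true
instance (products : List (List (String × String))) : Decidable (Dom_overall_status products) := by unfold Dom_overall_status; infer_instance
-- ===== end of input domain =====

-- B replaces A's intermediate states list and five separate any/all scans with one
-- flag-accumulating pass over products followed by the same priority ladder (alternative decomposition).

-- ===== PORT A =====
-- p["status"] under Pre_ (key present); getD "" is exact there
def pvStatus (p : List (String × String)) : String := PySem.Dict.getD (PySem.Dict.mk p) "status" ""

def overall_status (products : List (List (String × String))) : String :=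
  if products = [] then "Unknown"
  else
    let states := products.map (fun p => PySem.Str.lower (pvStatus p))
    if states.any (fun s => PySem.Str.isIn "updat" s) then "Updating"
    else if states.any (fun s => PySem.Str.isIn "test" s) then "Testing"
    else if states.any (fun s => PySem.Str.isIn "maintenance" s) then "Maintenance"
    else if states.any (fun s => PySem.Str.isIn "offline" s || PySem.Str.isIn "down" s) then "Offline"
    else if states.all (fun s => PySem.Str.isIn "online" s || PySem.Str.isIn "operational" s) then "Online"
    else pvStatus (products.headD [])

-- ===== PORT B =====
-- one pass: (has_updating, has_testing, has_maintenance, has_offline, all_online)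
def pvStep (st : Bool × Bool × Bool × Bool × Bool) (p : List (String × String)) :
    Bool × Bool × Bool × Bool × Bool :=
  let s := PySem.Str.lower (pvStatus p)
  (st.1 || PySem.Str.isIn "updat" s,
   st.2.1 || PySem.Str.isIn "test" s,
   st.2.2.1 || PySem.Str.isIn "maintenance" s,
   st.2.2.2.1 || PySem.Str.isIn "offline" s || PySem.Str.isIn "down" s,
   st.2.2.2.2 && (PySem.Str.isIn "online" s || PySem.Str.isIn "operational" s))

def overall_status_alt (products : List (List (String × String))) : String :=
  if products = [] then "Unknown"
  else
    let st := products.foldl pvStep (false, false, false, false, true)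
    if st.1 then "Updating"
    else if st.2.1 then "Testing"
    else if st.2.2.1 then "Maintenance"
    else if st.2.2.2.1 then "Offline"
    else if st.2.2.2.2 then "Online"
    else pvStatus (products.headD [])

-- ===== PRECONDITION & SPEC =====
-- Pre_ excludes inputs where some product lacks the "status" key: there Python A raises KeyError.
def Pre_overall_status (products : List (List (String × String))) : Prop :=
  ∀ p ∈ products, PySem.Dict.contains (PySem.Dict.mk p) "status" = true
instance (products : List (List (String × String))) : Decidable (Pre_overall_status products) := by
  unfold Pre_overall_status; infer_instance
def pvWitness_overall_status : (List (List (String × String))) := [[("status", "Online")]]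

def Spec_overall_status (products : List (List (String × String))) (out : String) : Prop := out = overall_status_alt products
instance (products : List (List (String × String))) (out : String) : Decidable (Spec_overall_status products out) := by unfold Spec_overall_status; infer_instance

-- ===== CLAIM (what is proved, stated in full; the proofs are below) =====
def Claim_equal_overall_status : Prop := ∀ (products : List (List (String × String))), Dom_overall_status products → Pre_overall_status products → Spec_overall_status products (overall_status products)

-- ===== LEMMAS AND PROOFS =====
-- the fold computes exactly the five scans of A over the mapped states
theorem pvFold_eq (products : List (List (String × String))) (a b c d : Bool) (e : Bool) :
    products.foldl pvStep (a, b, c, d, e) =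
      (a || (products.map (fun p => PySem.Str.lower (pvStatus p))).any (fun s => PySem.Str.isIn "updat" s),
       b || (products.map (fun p => PySem.Str.lower (pvStatus p))).any (fun s => PySem.Str.isIn "test" s),
       c || (products.map (fun p => PySem.Str.lower (pvStatus p))).any (fun s => PySem.Str.isIn "maintenance" s),
       d || (products.map (fun p => PySem.Str.lower (pvStatus p))).any (fun s => PySem.Str.isIn "offline" s || PySem.Str.isIn "down" s),
       e && (products.map (fun p => PySem.Str.lower (pvStatus p))).all (fun s => PySem.Str.isIn "online" s || PySem.Str.isIn "operational" s)) := by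
  induction products generalizing a b c d e with
  | nil => simp
  | cons p ps ih =>
    simp only [List.foldl_cons, List.map_cons, List.any_cons, List.all_cons, pvStep, ih]
    simp [Bool.or_assoc, Bool.and_assoc]

-- ===== VERDICT (by name: the statement is the Claim_ definition above) =====
theorem overall_status_spec : Claim_equal_overall_status := by
  intro products _ _
  unfold Spec_overall_status overall_status overall_status_alt
  by_cases h : products = []
  · simp [h]
  · simp only [h, if_false]
    rw [pvFold_eq]
    simp
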